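-- pv_equiv track=rewrite | github.com/arunkhattri/HackerRank | Misc/divisible_sum_pairs.py | divisible_sum_pairs
-- ===== SOURCE A (Python) =====
-- def divisible_sum_pairs(n, k, a):
--     res = []
--     initial_value = 0
--     while initial_value < len(a):
--         elem = initial_value + 1
--         for j in range(elem, len(a)):
--             if (a[initial_value] + a[j]) % k == 0:
--                 res.append((initial_value, j))
--         initial_value += 1
--     return (len(res))
-- ===== SOURCE B (Python) =====
-- def divisible_sum_pairs(n, k, a):
--     total = 0
--     seen = {}
--     for x in a:
--         total += seen.get((-x) % k, 0)
--         r = x % k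
--         seen[r] = seen.get(r, 0) + 1
--     return total
-- ===== Notes on version B (the rewrite author's own statement) =====
-- stated objective: faster
-- what changed: replaces the O(n^2) double scan over index pairs with a single pass that keeps a dict of residue counts and, for each element, adds the count of previously seen complementary residues
-- outside the precondition, e.g. on divisible_sum_pairs(1, 0, [5]): A returns 0, B raises ZeroDivisionError; on divisible_sum_pairs(0, 0, []): A returns 0, B returns 0
import Mathlib
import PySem

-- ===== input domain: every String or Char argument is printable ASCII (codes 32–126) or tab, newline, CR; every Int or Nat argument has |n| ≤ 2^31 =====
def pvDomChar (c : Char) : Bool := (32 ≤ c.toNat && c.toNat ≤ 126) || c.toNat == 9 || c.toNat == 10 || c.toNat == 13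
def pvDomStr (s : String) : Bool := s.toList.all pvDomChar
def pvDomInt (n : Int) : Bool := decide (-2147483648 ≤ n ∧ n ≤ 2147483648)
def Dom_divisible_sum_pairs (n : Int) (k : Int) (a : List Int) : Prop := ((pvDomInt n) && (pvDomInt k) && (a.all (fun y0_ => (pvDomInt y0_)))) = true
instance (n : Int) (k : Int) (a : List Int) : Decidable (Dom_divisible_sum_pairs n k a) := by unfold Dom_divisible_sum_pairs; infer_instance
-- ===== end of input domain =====

-- B replaces A's quadratic double scan over index pairs by a single pass with a dict of
-- residue counts (objective: faster, asymptotic).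


-- ===== PORT A =====
-- inner 'for j in range(initial_value + 1, len(a)): if (a[i]+a[j]) % k == 0: res.append((i, j))'
def dspInner (k : Int) (a : List Int) (i : Int) (res : List (Int × Int)) : List (Int × Int) :=
  (PySem.List.pyRange (i + 1) (PySem.List.len a) 1).foldl
    (fun res j =>
      if PySem.Int.mod (PySem.List.pyGetD a i 0 + PySem.List.pyGetD a j 0) k == 0
      then res ++ [(i, j)] else res) res

-- the 'while initial_value < len(a)' loop
def dspLoop (k : Int) (a : List Int) (i : Int) (res : List (Int × Int)) : List (Int × Int) :=
  if i < PySem.List.len a then dspLoop k a (i + 1) (dspInner k a i res) else res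
termination_by (PySem.List.len a - i).toNat
decreasing_by simp only [PySem.List.len_eq] at *; omega

def divisible_sum_pairs (n : Int) (k : Int) (a : List Int) : Int :=
  ((dspLoop k a 0 []).length : Int)

-- ===== PORT B =====
-- one iteration of B's 'for x in a' loop; state = (total, seen)
def dspStep (k : Int) (st : Int × PySem.Dict Int Int) (x : Int) : Int × PySem.Dict Int Int :=
  let total := st.1 + st.2.getD (PySem.Int.mod (-x) k) 0
  let r := PySem.Int.mod x k
  (total, st.2.insert r (st.2.getD r 0 + 1))

def divisible_sum_pairs_alt (n : Int) (k : Int) (a : List Int) : Int :=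
  (a.foldl (dspStep k) (0, PySem.Dict.empty)).1

-- ===== PRECONDITION & SPEC =====
-- Pre_ excludes k = 0, where Python's '%' raises ZeroDivisionError; with fewer than two elements A never
-- evaluates '%' and returns 0 there while B raises, so all of k = 0 is excluded.
def Pre_divisible_sum_pairs (n : Int) (k : Int) (a : List Int) : Prop := k ≠ 0
instance (n : Int) (k : Int) (a : List Int) : Decidable (Pre_divisible_sum_pairs n k a) := by unfold Pre_divisible_sum_pairs; infer_instance

def pvWitness_divisible_sum_pairs : Int × Int × List Int := (6, 3, [1, 3, 2, 6, 1, 2])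

def Spec_divisible_sum_pairs (n : Int) (k : Int) (a : List Int) (out : Int) : Prop := out = divisible_sum_pairs_alt n k a
instance (n : Int) (k : Int) (a : List Int) (out : Int) : Decidable (Spec_divisible_sum_pairs n k a out) := by unfold Spec_divisible_sum_pairs; infer_instance

-- ===== CLAIM (what is proved, stated in full; the proofs are below) =====
def Claim_equal_divisible_sum_pairs : Prop := ∀ (n : Int) (k : Int) (a : List Int), Dom_divisible_sum_pairs n k a → Pre_divisible_sum_pairs n k a → Spec_divisible_sum_pairs n k a (divisible_sum_pairs n k a)

-- ===== LEMMAS AND PROOFS =====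

-- number of y in l with (x + y) % k == 0
def cntP (k x : Int) (l : List Int) : Nat := l.countP (fun y => PySem.Int.mod (x + y) k == 0)

-- the pair count, peeling from the front (A's grouping by the first index)
def pairsF (k : Int) : List Int → Nat
  | [] => 0
  | x :: xs => cntP k x xs + pairsF k xs

-- the dict B has built after processing prefix p
def dspDict (k : Int) (p : List Int) : PySem.Dict Int Int :=
  p.foldl (fun d x => d.insert (PySem.Int.mod x k) (d.getD (PySem.Int.mod x k) 0 + 1)) PySem.Dict.empty

lemma mod_match_iff (k x y : Int) :
    (PySem.Int.mod y k == PySem.Int.mod (-x) k) = (PySem.Int.mod (x + y) k == 0) := by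
  rw [Bool.eq_iff_iff]
  simp only [beq_iff_eq]
  rw [PySem.Int.mod_eq_zero_iff_dvd]
  unfold PySem.Int.mod
  constructor
  · intro h
    have h1 := Int.fmod_add_fdiv y k
    have h2 := Int.fmod_add_fdiv (-x) k
    refine ⟨y.fdiv k - (-x).fdiv k, ?_⟩
    rw [h] at h1
    have hm := mul_sub k (y.fdiv k) ((-x).fdiv k)
    omega
  · rintro ⟨t, ht⟩
    have hy : y = -x + k * t := by omega
    rw [hy, Int.add_mul_fmod_self_left]

lemma dspDict_getD (k : Int) (p : List Int) (v : Int) :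
    (dspDict k p).getD v 0 = (p.countP (fun y => PySem.Int.mod y k == v) : Int) := by
  unfold dspDict
  rw [show (p.foldl (fun d x => d.insert (PySem.Int.mod x k) (d.getD (PySem.Int.mod x k) 0 + 1)) (PySem.Dict.empty : PySem.Dict Int Int))
        = ((p.map (fun x => PySem.Int.mod x k)).foldl (fun d r => d.insert r (d.getD r 0 + 1)) PySem.Dict.empty)
      from (List.foldl_map (f := fun x => PySem.Int.mod x k) (g := fun (d : PySem.Dict Int Int) r => d.insert r (d.getD r 0 + 1))).symm,
      PySem.Dict.getD_foldl_insert_add_one, PySem.Dict.getD_empty,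
      List.count_eq_countP, List.countP_map, Int.zero_add]
  rfl

lemma dspDict_append (k : Int) (p : List Int) (x : Int) :
    dspDict k (p ++ [x]) =
      (dspDict k p).insert (PySem.Int.mod x k) ((dspDict k p).getD (PySem.Int.mod x k) 0 + 1) := by
  unfold dspDict; rw [List.foldl_append]; rfl

lemma pairsF_append (k : Int) (p : List Int) (x : Int) :
    pairsF k (p ++ [x]) = pairsF k p + cntP k x p := by
  induction p with
  | nil => simp [pairsF, cntP]
  | cons y p ih =>
      simp only [List.cons_append, pairsF, ih]
      unfold cntP
      rw [List.countP_append]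
      simp only [List.countP_cons, List.countP_nil]
      rw [show (PySem.Int.mod (y + x) k == 0) = (PySem.Int.mod (x + y) k == 0) by rw [Int.add_comm]]
      omega

lemma alt_loop (k : Int) (l : List Int) : ∀ (p : List Int),
    l.foldl (dspStep k) ((pairsF k p : Int), dspDict k p) =
      ((pairsF k (p ++ l) : Int), dspDict k (p ++ l)) := by
  induction l with
  | nil => intro p; simp
  | cons x l ih =>
      intro p
      have hstep : dspStep k ((pairsF k p : Int), dspDict k p) x =
          ((pairsF k (p ++ [x]) : Int), dspDict k (p ++ [x])) := by
        unfold dspStep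
        simp only
        rw [dspDict_getD, dspDict_append, pairsF_append]
        congr 1
        · push_cast
          congr 1
          rw [show (fun y => PySem.Int.mod y k == PySem.Int.mod (-x) k)
                = (fun y => PySem.Int.mod (x + y) k == 0) from funext fun y => mod_match_iff k x y]
          rfl
      rw [List.foldl_cons, hstep, ih (p ++ [x])]
      simp

lemma alt_eq_pairsF (n k : Int) (a : List Int) :
    divisible_sum_pairs_alt n k a = (pairsF k a : Int) := by
  unfold divisible_sum_pairs_alt
  have h0 : ((0 : Int), (PySem.Dict.empty : PySem.Dict Int Int)) =
      ((pairsF k ([] : List Int) : Int), dspDict k []) := by simp [pairsF, dspDict]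
  rw [h0, alt_loop k a []]
  simp

lemma inner_length (k : Int) (a : List Int) (i : Int) (res : List (Int × Int))
    (h0 : 0 ≤ i) (h1 : i < (a.length : Int)) :
    (dspInner k a i res).length =
      res.length + cntP k (a[i.toNat]'(by omega)) (a.drop (i + 1).toNat) := by
  unfold dspInner
  rw [PySem.List.foldl_append_if
        (p := fun j => PySem.Int.mod (PySem.List.pyGetD a i 0 + PySem.List.pyGetD a j 0) k == 0)
        (f := fun j => ((i, j) : Int × Int))]
  rw [List.length_append, List.length_map, ← List.countP_eq_length_filter]
  congr 1
  have hmap := PySem.List.map_pyGetD_pyRange a 0 (a := i + 1) (by omega)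
  rw [PySem.List.pyGetD_eq_getElem a 0 h0 h1]
  unfold cntP
  rw [← hmap, List.countP_map]
  congr 1

theorem a_loop_length (k : Int) (a : List Int) : ∀ (fuel : Nat) (i : Int) (res : List (Int × Int)),
    0 ≤ i → fuel = ((a.length : Int) - i).toNat →
    (dspLoop k a i res).length = res.length + pairsF k (a.drop i.toNat) := by
  intro fuel
  induction fuel with
  | zero =>
      intro i res h0 hf
      rw [dspLoop]
      simp only [PySem.List.len_eq]
      rw [if_neg (by omega)]
      rw [List.drop_eq_nil_of_le (by omega)]
      simp [pairsF]
  | succ m ih =>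
      intro i res h0 hf
      rw [dspLoop]
      simp only [PySem.List.len_eq]
      by_cases hi : i < (a.length : Int)
      · rw [if_pos hi]
        rw [ih (i + 1) (dspInner k a i res) (by omega) (by omega)]
        rw [inner_length k a i res h0 hi]
        have hd : a.drop i.toNat = a[i.toNat]'(by omega) :: a.drop (i.toNat + 1) :=
          List.drop_eq_getElem_cons (by omega)
        rw [hd]
        simp only [pairsF]
        have : (i + 1).toNat = i.toNat + 1 := by omega
        rw [this]
        omega
      · rw [if_neg hi]
        rw [List.drop_eq_nil_of_le (by omega)]
        simp [pairsF]

lemma a_eq_pairsF (n k : Int) (a : List Int) :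
    divisible_sum_pairs n k a = (pairsF k a : Int) := by
  unfold divisible_sum_pairs
  rw [a_loop_length k a ((a.length : Int) - 0).toNat 0 [] le_rfl rfl]
  simp

-- ===== VERDICT (by name: the statement is the Claim_ definition above) =====
theorem divisible_sum_pairs_spec : Claim_equal_divisible_sum_pairs := by
  intro n k a _ _
  unfold Spec_divisible_sum_pairs
  rw [a_eq_pairsF, alt_eq_pairsF]
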